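-- pv_equiv track=rewrite | github.com/vicentcaselles/Coursera_Biology_Meets_Programming | Week_2_functions.py | SymbolArrayLite
-- ===== SOURCE A (Python) =====
-- def SymbolArrayLite(Genome, Symbol):
--     output = {}
--     ExtendedGenome = Genome + Genome[0:len(Genome)//2]
--     output[0] = ExtendedGenome[0:len(Genome)//2].count(Symbol)
--     for i in range(1, len(Genome)):
--         output[i] = output[i - 1]
--         if ExtendedGenome[i-1] == Symbol:
--             output.update({i: output[i] - 1})
--         if ExtendedGenome[i + len(Genome)//2 - 1] == Symbol:
--             output.update({i: output[i] + 1})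
--     return output
-- ===== SOURCE B (Python) =====
-- def SymbolArrayLite(Genome, Symbol):
--     n = len(Genome)
--     half = n // 2
--     ExtendedGenome = Genome + Genome[0:half]
--     # prefix[j] = number of positions k < j with ExtendedGenome[k] == Symbol
--     prefix = [0]
--     for ch in ExtendedGenome:
--         prefix.append(prefix[-1] + (1 if ch == Symbol else 0))
--     base = ExtendedGenome[0:half].count(Symbol)
--     output = {0: base}
--     for i in range(1, n):
--         output[i] = base + (prefix[i + half] - prefix[i]) - prefix[half]
--     return output
-- ===== Notes on version B (the rewrite author's own statement) =====
-- stated objective: alternative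
-- what changed: B replaces A's incremental add/remove running-count recurrence (each window value derived from the previous by inspecting the two boundary characters) with a prefix-sum array built in one pass and a stateless closed formula per window (three prefix lookups).
import Mathlib
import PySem

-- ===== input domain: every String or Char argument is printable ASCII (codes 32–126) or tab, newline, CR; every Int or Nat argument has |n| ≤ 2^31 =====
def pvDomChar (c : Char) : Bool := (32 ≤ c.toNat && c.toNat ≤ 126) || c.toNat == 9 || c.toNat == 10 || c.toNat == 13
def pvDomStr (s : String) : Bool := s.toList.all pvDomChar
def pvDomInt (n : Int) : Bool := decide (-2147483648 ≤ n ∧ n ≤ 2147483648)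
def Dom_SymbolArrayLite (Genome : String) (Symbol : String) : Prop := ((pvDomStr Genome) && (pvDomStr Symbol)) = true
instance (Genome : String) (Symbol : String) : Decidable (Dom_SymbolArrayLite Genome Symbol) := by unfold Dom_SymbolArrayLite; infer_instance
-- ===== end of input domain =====

-- B replaces A's incremental add/remove recurrence by a prefix-sum array and a closed formula per window
-- (objective: alternative — same O(n) cost, stateless per-index formula instead of a propagated running count).

-- ===== PORT A =====
-- literal transliteration of A: a dict filled by an incremental loop; the per-step
-- indices i-1 and i+half-1 are always in range for i in range(1, len), so pyGetD's
-- default ' ' is never read.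
-- the body of A's for-loop (output[i] = output[i-1]; two conditional updates)
def pvStepA (sym ext : List Char) (half : Int) (d : PySem.Dict Int Int) (i : Int) : PySem.Dict Int Int :=
  let d := d.insert i (d.getD (i - 1) 0)
  let d := if [PySem.List.pyGetD ext (i - 1) ' '] = sym then d.insert i (d.getD i 0 - 1) else d
  let d := if [PySem.List.pyGetD ext (i + half - 1) ' '] = sym then d.insert i (d.getD i 0 + 1) else d
  d

def SymbolArrayLite (Genome : String) (Symbol : String) : List (Int × Int) :=
  let g := Genome.toList
  let sym := Symbol.toList
  let half : Int := PySem.Int.floordiv (g.length : Int) 2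
  let ext := g ++ PySem.List.slice g (some 0) (some half)
  let d : PySem.Dict Int Int :=
    (PySem.Dict.mk []).insert 0 ((PySem.Chars.count (PySem.List.slice ext (some 0) (some half)) sym : Nat) : Int)
  let d := (PySem.List.pyRange 1 (g.length : Int)).foldl (pvStepA sym ext half) d
  d.items

-- ===== PORT B =====
-- literal transliteration of B: scanl builds the prefix-count list (Source B's append loop),
-- each window value is a closed formula over three prefix lookups.
-- the body of B's for-loop (one insert of the closed-form window value)
def pvStepB (pre : List Int) (base half : Int) (d : PySem.Dict Int Int) (i : Int) : PySem.Dict Int Int :=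
  d.insert i (base + (PySem.List.pyGetD pre (i + half) 0 - PySem.List.pyGetD pre i 0)
                - PySem.List.pyGetD pre half 0)
def SymbolArrayLite_alt (Genome : String) (Symbol : String) : List (Int × Int) :=
  let g := Genome.toList
  let sym := Symbol.toList
  let n : Int := (g.length : Int)
  let half : Int := PySem.Int.floordiv n 2
  let ext := g ++ PySem.List.slice g (some 0) (some half)
  let pre := ext.scanl (fun a c => a + (if [c] = sym then (1 : Int) else 0)) 0
  let base : Int := ((PySem.Chars.count (PySem.List.slice ext (some 0) (some half)) sym : Nat) : Int)
  let d : PySem.Dict Int Int := (PySem.Dict.mk []).insert 0 base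
  let d := (PySem.List.pyRange 1 n).foldl (pvStepB pre base half) d
  d.items

-- ===== PRECONDITION & SPEC =====
def Spec_SymbolArrayLite (Genome : String) (Symbol : String) (out : List (Int × Int)) : Prop := out = SymbolArrayLite_alt Genome Symbol
instance (Genome : String) (Symbol : String) (out : List (Int × Int)) : Decidable (Spec_SymbolArrayLite Genome Symbol out) := by unfold Spec_SymbolArrayLite; infer_instance

-- ===== CLAIM (what is proved, stated in full; the proofs are below) =====
def Claim_equal_SymbolArrayLite : Prop := ∀ (Genome : String) (Symbol : String), Dom_SymbolArrayLite Genome Symbol → Spec_SymbolArrayLite Genome Symbol (SymbolArrayLite Genome Symbol)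

-- ===== LEMMAS AND PROOFS =====

-- 0/1 indicator of a character matching the symbol (as a 1-char string)
def pvInd (sym : List Char) (c : Char) : Int := if [c] = sym then 1 else 0

-- number of matches among the first j characters
def pvCnt (sym ext : List Char) (j : Nat) : Int := ((ext.take j).map (pvInd sym)).sum

-- the closed-form value of window i (equals A's running count, proved below)
def pvF (sym ext : List Char) (half : Nat) (base : Int) (i : Nat) : Int :=
  base + (pvCnt sym ext (i + half) - pvCnt sym ext i) - pvCnt sym ext half

lemma pvCnt_succ (sym ext : List Char) (j : Nat) (hj : j < ext.length) :
    pvCnt sym ext (j + 1) = pvCnt sym ext j + pvInd sym (ext.getD j ' ') := by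
  simp only [pvCnt, List.take_add_one, List.getElem?_eq_getElem hj, Option.toList_some,
    List.map_append, List.sum_append, List.map_cons, List.map_nil, List.sum_cons, List.sum_nil,
    List.getD_eq_getElem _ _ hj]
  ring

lemma pvScanl_getD (sym : List Char) (l : List Char) (s : Int) (j : Nat) (hj : j ≤ l.length) :
    (l.scanl (fun a c => a + (if [c] = sym then (1 : Int) else 0)) s).getD j 0 = s + pvCnt sym l j := by
  induction l generalizing s j with
  | nil =>
    have hj0 : j = 0 := by simpa using hj
    subst hj0
    simp [pvCnt]
  | cons c l ih =>
    cases j with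
    | zero => simp [pvCnt]
    | succ j =>
      rw [List.scanl_cons]
      simp only [List.getD_cons_succ]
      rw [ih _ j (by simpa using hj)]
      simp [pvCnt, pvInd]
      ring

lemma pvFind_range_none (G : Nat → Int) (m : Nat) :
    List.find? (fun p => p.1 == (m : Int)) ((List.range m).map (fun (i : Nat) => ((i : Int), G i))) = none := by
  rw [List.find?_eq_none]
  rintro ⟨k, v⟩ hk
  simp only [List.mem_map, List.mem_range, Prod.mk.injEq] at hk
  obtain ⟨i, him, hi, -⟩ := hk
  simp only [beq_iff_eq]
  subst hi
  intro h
  exact absurd (by exact_mod_cast h) (Nat.ne_of_lt him)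

-- find? on a range-keyed association list
lemma pvFind_range (G : Nat → Int) (m j : Nat) (hj : j < m) :
    List.find? (fun p => p.1 == (j : Int)) ((List.range m).map (fun (i : Nat) => ((i : Int), G i)))
      = some ((j : Int), G j) := by
  induction m with
  | zero => omega
  | succ m ih =>
    rw [List.range_succ, List.map_append, List.find?_append]
    rcases Nat.lt_or_ge j m with h | h
    · rw [ih h]; rfl
    · have hj' : j = m := by omega
      subst hj'
      rw [pvFind_range_none]
      simp

-- association-list facts for the fresh-key inserts the two loops perform
lemma pvNoKey {l : List (Int × Int)} {k : Int} (h : List.find? (fun p => p.1 == k) l = none) :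
    ∀ p ∈ l, (p.1 == k) = false := by
  intro p hp
  simpa using List.find?_eq_none.mp h p hp

lemma pvDict_insert_fresh (l : List (Int × Int)) (k v : Int)
    (h : List.find? (fun p => p.1 == k) l = none) :
    PySem.Dict.insert (PySem.Dict.mk l) k v = PySem.Dict.mk (l ++ [(k, v)]) := by
  have hc : (PySem.Dict.mk l).contains k = false := by
    simp only [PySem.Dict.contains, List.any_eq_false]
    intro p hp
    simp [pvNoKey h p hp]
  simp [PySem.Dict.insert, hc]

lemma pvDict_getD_last (l : List (Int × Int)) (k v : Int)
    (h : List.find? (fun p => p.1 == k) l = none) :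
    PySem.Dict.getD (PySem.Dict.mk (l ++ [(k, v)])) k 0 = v := by
  simp [PySem.Dict.getD, PySem.Dict.get?, List.find?_append, h]

lemma pvDict_insert_last (l : List (Int × Int)) (k w v : Int)
    (h : List.find? (fun p => p.1 == k) l = none) :
    PySem.Dict.insert (PySem.Dict.mk (l ++ [(k, w)])) k v = PySem.Dict.mk (l ++ [(k, v)]) := by
  have hc : (PySem.Dict.mk (l ++ [(k, w)])).contains k = true := by
    simp [PySem.Dict.contains]
  simp only [PySem.Dict.insert, hc, if_pos]
  congr 1
  rw [List.map_append]
  congr 1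
  · conv_rhs => rw [← List.map_id l]
    exact List.map_congr_left (fun p hp => by simp [pvNoKey h p hp])
  · simp

lemma pvDict_getD_range (G : Nat → Int) (m j : Nat) (hj : j < m) :
    PySem.Dict.getD (PySem.Dict.mk ((List.range m).map (fun (i : Nat) => ((i : Int), G i)))) (j : Int) 0 = G j := by
  simp [PySem.Dict.getD, PySem.Dict.get?, pvFind_range G m j hj]

lemma pvRange_table_succ (G : Nat → Int) (m : Nat) :
    (List.range (m + 1)).map (fun (i : Nat) => ((i : Int), G i))
      = (List.range m).map (fun (i : Nat) => ((i : Int), G i)) ++ [((m : Int), G m)] := by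
  rw [List.range_succ, List.map_append]
  rfl

-- the closed form satisfies A's recurrence
lemma pvF_succ (sym ext : List Char) (half : Nat) (base : Int) (j : Nat)
    (h1 : j < ext.length) (h2 : j + half < ext.length) :
    pvF sym ext half base (j + 1)
      = pvF sym ext half base j - pvInd sym (ext.getD j ' ') + pvInd sym (ext.getD (j + half) ' ') := by
  have e1 := pvCnt_succ sym ext j h1
  have e2 := pvCnt_succ sym ext (j + half) h2
  simp only [pvF, show j + 1 + half = j + half + 1 from by omega]
  omega

-- A's fold over range(1, m) produces exactly the closed-form table
lemma pvA_fold (sym ext : List Char) (half : Nat) (base : Int) (n : Nat)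
    (hlen : ext.length = n + half) (hF0 : pvF sym ext half base 0 = base) (m : Nat) (hm : 1 ≤ m) (hmn : m ≤ n) :
    (PySem.List.pyRange 1 (m : Int)).foldl (pvStepA sym ext (half : Int)) ((PySem.Dict.mk []).insert 0 base)
      = PySem.Dict.mk ((List.range m).map (fun (i : Nat) => ((i : Int), pvF sym ext half base i))) := by
  revert hmn
  induction m, hm using Nat.le_induction with
  | base =>
    intro _
    rw [show ((1 : Nat) : Int) = 1 from rfl, show PySem.List.pyRange 1 1 = [] from rfl]
    rw [List.foldl_nil, pvDict_insert_fresh [] 0 base rfl]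
    simp [List.range_succ, hF0]
  | succ m hm ih =>
    intro hmn
    have hmn' : m ≤ n := by omega
    rw [show (((m + 1 : Nat)) : Int) = (m : Int) + 1 from by push_cast; ring]
    rw [PySem.List.pyRange_one_succ_right (by exact_mod_cast hm), List.foldl_append, ih hmn']
    simp only [List.foldl_cons, List.foldl_nil, pvStepA]
    have hc1 : ((m : Int) - 1) = (((m - 1 : Nat)) : Int) := by push_cast [Nat.cast_sub hm]; ring
    have hc2 : ((m : Int) + (half : Int) - 1) = (((m - 1 + half : Nat)) : Int) := by
      push_cast [Nat.cast_sub hm]; ring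
    have hg1 : PySem.List.pyGetD ext ((m : Int) - 1) ' ' = ext.getD (m - 1) ' ' := by
      rw [hc1, PySem.List.pyGetD_natCast]
    have hg2 : PySem.List.pyGetD ext ((m : Int) + (half : Int) - 1) ' ' = ext.getD (m - 1 + half) ' ' := by
      rw [hc2, PySem.List.pyGetD_natCast]
    have hfind := pvFind_range_none (fun i => pvF sym ext half base i) m
    have hstep := pvF_succ sym ext half base (m - 1) (by omega) (by omega)
    have hm1 : m - 1 + 1 = m := by omega
    rw [hm1] at hstep
    have hget1 : PySem.Dict.getD (PySem.Dict.mk ((List.range m).map (fun (i : Nat) => ((i : Int), pvF sym ext half base i)))) ((m : Int) - 1) 0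
        = pvF sym ext half base (m - 1) := by
      rw [hc1]
      exact pvDict_getD_range _ m (m - 1) (by omega)
    rw [pvDict_insert_fresh _ _ _ hfind, hget1, hg1, hg2, pvRange_table_succ]
    by_cases h1 : [ext.getD (m - 1) ' '] = sym <;> by_cases h2 : [ext.getD (m - 1 + half) ' '] = sym <;>
      simp only [h1, h2, if_pos, if_neg, not_false_iff, reduceIte] <;>
      rw [hstep] <;>
      simp only [pvInd, h1, h2, if_pos, if_neg, reduceIte] <;>
      first
        | (rw [pvDict_getD_last _ _ _ hfind, pvDict_insert_last _ _ _ _ hfind,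
              pvDict_getD_last _ _ _ hfind, pvDict_insert_last _ _ _ _ hfind] <;> ring_nf)
        | (rw [pvDict_getD_last _ _ _ hfind, pvDict_insert_last _ _ _ _ hfind] <;> ring_nf)
        | simp

-- B's fold over range(1, m) produces the same table
lemma pvB_fold (sym ext : List Char) (half : Nat) (base : Int) (n : Nat)
    (hlen : ext.length = n + half) (hF0 : pvF sym ext half base 0 = base) (m : Nat) (hm : 1 ≤ m) (hmn : m ≤ n) :
    (PySem.List.pyRange 1 (m : Int)).foldl (pvStepB (ext.scanl (fun a c => a + (if [c] = sym then (1 : Int) else 0)) 0) base (half : Int)) ((PySem.Dict.mk []).insert 0 base)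
      = PySem.Dict.mk ((List.range m).map (fun (i : Nat) => ((i : Int), pvF sym ext half base i))) := by
  revert hmn
  induction m, hm using Nat.le_induction with
  | base =>
    intro _
    rw [show ((1 : Nat) : Int) = 1 from rfl, show PySem.List.pyRange 1 1 = [] from rfl]
    rw [List.foldl_nil, pvDict_insert_fresh [] 0 base rfl]
    simp [List.range_succ, hF0]
  | succ m hm ih =>
    intro hmn
    have hmn' : m ≤ n := by omega
    rw [show (((m + 1 : Nat)) : Int) = (m : Int) + 1 from by push_cast; ring]
    rw [PySem.List.pyRange_one_succ_right (by exact_mod_cast hm), List.foldl_append, ih hmn']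
    simp only [List.foldl_cons, List.foldl_nil, pvStepB]
    have hv1 : PySem.List.pyGetD (ext.scanl (fun a c => a + (if [c] = sym then (1 : Int) else 0)) 0) ((m : Int) + (half : Int)) 0
        = pvCnt sym ext (m + half) := by
      rw [show (m : Int) + (half : Int) = (((m + half : Nat)) : Int) from by push_cast; ring,
        PySem.List.pyGetD_natCast, pvScanl_getD sym ext 0 (m + half) (by omega), zero_add]
    have hv2 : PySem.List.pyGetD (ext.scanl (fun a c => a + (if [c] = sym then (1 : Int) else 0)) 0) ((m : Int)) 0
        = pvCnt sym ext m := by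
      rw [PySem.List.pyGetD_natCast, pvScanl_getD sym ext 0 m (by omega), zero_add]
    have hv3 : PySem.List.pyGetD (ext.scanl (fun a c => a + (if [c] = sym then (1 : Int) else 0)) 0) ((half : Nat) : Int) 0
        = pvCnt sym ext half := by
      rw [PySem.List.pyGetD_natCast, pvScanl_getD sym ext 0 half (by omega), zero_add]
    rw [hv1, hv2, hv3, pvDict_insert_fresh _ _ _ (pvFind_range_none _ m), pvRange_table_succ]
    rfl

-- ===== VERDICT (by name: the statement is the Claim_ definition above) =====
theorem SymbolArrayLite_spec : Claim_equal_SymbolArrayLite := by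
  intro Genome Symbol _
  show SymbolArrayLite Genome Symbol = SymbolArrayLite_alt Genome Symbol
  simp only [SymbolArrayLite, SymbolArrayLite_alt]
  have hhalf : PySem.Int.floordiv ((Genome.toList.length : Nat) : Int) 2
      = (((Genome.toList.length / 2 : Nat)) : Int) := by
    exact_mod_cast PySem.Int.floordiv_natCast Genome.toList.length 2
  rw [hhalf]
  have hslice : ∀ l : List Char,
      PySem.List.slice l (some 0) (some (((Genome.toList.length / 2 : Nat)) : Int))
        = l.take (Genome.toList.length / 2) := fun l => by
    simpa using PySem.List.slice_natCast l 0 (Genome.toList.length / 2)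
  simp only [hslice]
  have hlen : (Genome.toList ++ Genome.toList.take (Genome.toList.length / 2)).length
      = Genome.toList.length + Genome.toList.length / 2 := by
    simp
    omega
  have hF0 : ∀ base : Int,
      pvF Symbol.toList (Genome.toList ++ Genome.toList.take (Genome.toList.length / 2))
        (Genome.toList.length / 2) base 0 = base := by
    intro base
    have hc0 : pvCnt Symbol.toList (Genome.toList ++ Genome.toList.take (Genome.toList.length / 2)) 0 = 0 := by
      simp [pvCnt]
    simp only [pvF, Nat.zero_add, hc0]
    ring
  rcases Nat.eq_zero_or_pos Genome.toList.length with h0 | hpos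
  · simp only [h0]
    rfl
  · rw [pvA_fold Symbol.toList _ _ _ Genome.toList.length hlen (hF0 _) Genome.toList.length hpos le_rfl,
      pvB_fold Symbol.toList _ _ _ Genome.toList.length hlen (hF0 _) Genome.toList.length hpos le_rfl]
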